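-- pv_equiv track=rewrite | github.com/Smith-Danielle/PythonPractice | main.py | segment_display
-- ===== SOURCE A (Python) =====
-- def segment_display(num):
--     zero = ["  ###  ", " #   # ", " #   # ", " #   # ", "       ", " #   # ", " #   # ", " #   # ", "  ###  "]
--     one = ["       ", "     # ", "     # ", "     # ", "       ", "     # ", "     # ", "     # ", "       "]
--     two = ["  ###  ", "     # ", "     # ", "     # ", "  ###  ", " #     ", " #     ", " #     ", "  ###  "]
--     three = ["  ###  ", "     # ", "     # ", "     # ", "  ###  ", "     # ", "     # ", "     # ", "  ###  "]
--     four = ["       ", " #   # ", " #   # ", " #   # ", "  ###  ", "     # ", "     # ", "     # ", "       "]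
--     five = ["  ###  ", " #     ", " #     ", " #     ", "  ###  ", "     # ", "     # ", "     # ", "  ###  "]
--     six = ["  ###  ", " #     ", " #     ", " #     ", "  ###  ", " #   # ", " #   # ", " #   # ", "  ###  "]
--     seven = ["  ###  ", "     # ", "     # ", "     # ", "       ", "     # ", "     # ", "     # ", "       "]
--     eight = ["  ###  ", " #   # ", " #   # ", " #   # ", "  ###  ", " #   # ", " #   # ", " #   # ", "  ###  "]
--     nine = ["  ###  ", " #   # ", " #   # ", " #   # ", "  ###  ", "     # ", "     # ", "     # ", "  ###  "]
--     space = ["       ", "       ", "       ", "       ", "       ", "       ", "       ", "       ", "       "]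
--
--     number = str(num).rjust(6, ' ')
--     display = ""
--     for x in range(9):
--         for y in number:
--             if y == '0':
--                 display += '|' + zero[x]
--             if y == '1':
--                 display += '|' + one[x]
--             if y == '2':
--                 display += '|' + two[x]
--             if y == '3':
--                 display += '|' + three[x]
--             if y == '4':
--                 display += '|' + four[x]
--             if y == '5':
--                 display += '|' + five[x]
--             if y == '6':
--                 display += '|' + six[x]
--             if y == '7':
--                 display += '|' + seven[x]
--             if y == '8':
--                 display += '|' + eight[x]
--             if y == '9':
--                 display += '|' + nine[x]
--             if y == ' ':
--                 display += '|' + space[x]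
--         display += "|\n"
--     return display
-- ===== SOURCE B (Python) =====
-- def segment_display(num):
--     # seven-segment bitmasks: bit6=top, bit5=top-left, bit4=top-right,
--     # bit3=middle, bit2=bottom-left, bit1=bottom-right, bit0=bottom
--     SEG = {'0': 0b1110111, '1': 0b0010010, '2': 0b1011101, '3': 0b1011011,
--            '4': 0b0111010, '5': 0b1101011, '6': 0b1101111, '7': 0b1010010,
--            '8': 0b1111111, '9': 0b1111011, ' ': 0}
--     number = str(num).rjust(6, ' ')
--     masks = [SEG[c] for c in number if c in SEG]
--
--     def hrow(bit):
--         return ''.join('|' + ("  ###  " if m >> bit & 1 else "       ") for m in masks)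
--
--     def vrow(l, r):
--         return ''.join('|' + ' ' + ('#' if m >> l & 1 else ' ') + '   '
--                        + ('#' if m >> r & 1 else ' ') + ' ' for m in masks)
--
--     rows = [hrow(6), vrow(5, 4), vrow(5, 4), vrow(5, 4), hrow(3),
--             vrow(2, 1), vrow(2, 1), vrow(2, 1), hrow(0)]
--     return ''.join(r + '|\n' for r in rows)
-- ===== Notes on version B (the rewrite author's own statement) =====
-- stated objective: alternative
-- what changed: B stores no glyph artwork at all: each character is encoded as a seven-segment bitmask and every output row is synthesized from the bits (horizontal-bar rows from one bit, vertical rows from two bits), replacing A's hard-coded per-digit glyph arrays scanned via an if-chain per row.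
import Mathlib
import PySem

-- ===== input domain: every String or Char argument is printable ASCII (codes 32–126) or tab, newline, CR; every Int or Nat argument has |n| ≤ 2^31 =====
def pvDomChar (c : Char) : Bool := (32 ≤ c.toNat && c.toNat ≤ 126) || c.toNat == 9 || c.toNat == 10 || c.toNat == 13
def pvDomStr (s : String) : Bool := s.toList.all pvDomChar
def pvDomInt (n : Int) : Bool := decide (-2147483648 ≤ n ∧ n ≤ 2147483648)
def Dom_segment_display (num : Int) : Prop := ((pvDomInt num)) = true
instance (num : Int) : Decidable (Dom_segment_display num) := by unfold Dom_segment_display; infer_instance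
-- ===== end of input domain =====

-- B stores no glyph artwork: each character becomes a 7-bit seven-segment bitmask and rows are
-- synthesized from the bits, instead of A's eleven hard-coded glyph arrays; objective: alternative.

-- str(num).rjust(6, ' ') — Python right-justify, exact: pad with spaces to width 6 (no-op if longer)
def sdNumber (num : Int) : List Char :=
  List.replicate (6 - (PySem.Int.toChars num).length) ' ' ++ PySem.Int.toChars num

-- ===== PORT A =====
def sdZero : List (List Char) := ["  ###  ".toList, " #   # ".toList, " #   # ".toList, " #   # ".toList, "       ".toList, " #   # ".toList, " #   # ".toList, " #   # ".toList, "  ###  ".toList]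
def sdOne : List (List Char) := ["       ".toList, "     # ".toList, "     # ".toList, "     # ".toList, "       ".toList, "     # ".toList, "     # ".toList, "     # ".toList, "       ".toList]
def sdTwo : List (List Char) := ["  ###  ".toList, "     # ".toList, "     # ".toList, "     # ".toList, "  ###  ".toList, " #     ".toList, " #     ".toList, " #     ".toList, "  ###  ".toList]
def sdThree : List (List Char) := ["  ###  ".toList, "     # ".toList, "     # ".toList, "     # ".toList, "  ###  ".toList, "     # ".toList, "     # ".toList, "     # ".toList, "  ###  ".toList]
def sdFour : List (List Char) := ["       ".toList, " #   # ".toList, " #   # ".toList, " #   # ".toList, "  ###  ".toList, "     # ".toList, "     # ".toList, "     # ".toList, "       ".toList]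
def sdFive : List (List Char) := ["  ###  ".toList, " #     ".toList, " #     ".toList, " #     ".toList, "  ###  ".toList, "     # ".toList, "     # ".toList, "     # ".toList, "  ###  ".toList]
def sdSix : List (List Char) := ["  ###  ".toList, " #     ".toList, " #     ".toList, " #     ".toList, "  ###  ".toList, " #   # ".toList, " #   # ".toList, " #   # ".toList, "  ###  ".toList]
def sdSeven : List (List Char) := ["  ###  ".toList, "     # ".toList, "     # ".toList, "     # ".toList, "       ".toList, "     # ".toList, "     # ".toList, "     # ".toList, "       ".toList]
def sdEight : List (List Char) := ["  ###  ".toList, " #   # ".toList, " #   # ".toList, " #   # ".toList, "  ###  ".toList, " #   # ".toList, " #   # ".toList, " #   # ".toList, "  ###  ".toList]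
def sdNine : List (List Char) := ["  ###  ".toList, " #   # ".toList, " #   # ".toList, " #   # ".toList, "  ###  ".toList, "     # ".toList, "     # ".toList, "     # ".toList, "  ###  ".toList]
def sdSpace : List (List Char) := ["       ".toList, "       ".toList, "       ".toList, "       ".toList, "       ".toList, "       ".toList, "       ".toList, "       ".toList, "       ".toList]

-- A's inner loop body: the chain of eleven independent `if`s appending '|' + glyph[x]
def sdStepA (x : Int) (d : List Char) (y : Char) : List Char :=
  let d := if y = '0' then d ++ '|' :: PySem.List.pyGetD sdZero x [] else d
  let d := if y = '1' then d ++ '|' :: PySem.List.pyGetD sdOne x [] else d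
  let d := if y = '2' then d ++ '|' :: PySem.List.pyGetD sdTwo x [] else d
  let d := if y = '3' then d ++ '|' :: PySem.List.pyGetD sdThree x [] else d
  let d := if y = '4' then d ++ '|' :: PySem.List.pyGetD sdFour x [] else d
  let d := if y = '5' then d ++ '|' :: PySem.List.pyGetD sdFive x [] else d
  let d := if y = '6' then d ++ '|' :: PySem.List.pyGetD sdSix x [] else d
  let d := if y = '7' then d ++ '|' :: PySem.List.pyGetD sdSeven x [] else d
  let d := if y = '8' then d ++ '|' :: PySem.List.pyGetD sdEight x [] else d
  let d := if y = '9' then d ++ '|' :: PySem.List.pyGetD sdNine x [] else d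
  let d := if y = ' ' then d ++ '|' :: PySem.List.pyGetD sdSpace x [] else d
  d

def segment_display (num : Int) : String :=
  let number := sdNumber num
  String.ofList ((PySem.List.pyRange 0 9 1).foldl
    (fun d x => (number.foldl (sdStepA x) d) ++ ['|', '\n']) [])

-- ===== PORT B =====
-- seven-segment bitmasks: bit6=top, bit5=top-left, bit4=top-right, bit3=middle,
-- bit2=bottom-left, bit1=bottom-right, bit0=bottom
def sdSEG : PySem.Dict Char Nat :=
  PySem.Dict.ofList [('0', 119), ('1', 18), ('2', 93), ('3', 91), ('4', 58),
                     ('5', 107), ('6', 111), ('7', 82), ('8', 127), ('9', 123), (' ', 0)]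

def sdHPiece (m bit : Nat) : List Char :=
  if (m >>> bit) % 2 = 1 then "  ###  ".toList else "       ".toList
def sdVChar (m bit : Nat) : Char := if (m >>> bit) % 2 = 1 then '#' else ' '
def sdVPiece (m l r : Nat) : List Char := [' ', sdVChar m l, ' ', ' ', ' ', sdVChar m r, ' ']

-- ''.join('|' + piece for m in masks)
def sdHRow (masks : List Nat) (bit : Nat) : List Char := masks.flatMap (fun m => '|' :: sdHPiece m bit)
def sdVRow (masks : List Nat) (l r : Nat) : List Char := masks.flatMap (fun m => '|' :: sdVPiece m l r)

def segment_display_alt (num : Int) : String :=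
  let number := sdNumber num
  let masks := number.filterMap (fun c => sdSEG.get? c)
  let rows := [sdHRow masks 6, sdVRow masks 5 4, sdVRow masks 5 4, sdVRow masks 5 4,
               sdHRow masks 3, sdVRow masks 2 1, sdVRow masks 2 1, sdVRow masks 2 1, sdHRow masks 0]
  String.ofList ((rows.map (fun r => r ++ ['|', '\n'])).flatten)

-- ===== PRECONDITION & SPEC =====
def Spec_segment_display (num : Int) (out : String) : Prop := out = segment_display_alt num
instance (num : Int) (out : String) : Decidable (Spec_segment_display num out) := by unfold Spec_segment_display; infer_instance

-- ===== CLAIM (what is proved, stated in full; the proofs are below) =====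
def Claim_equal_segment_display : Prop := ∀ (num : Int), Dom_segment_display num → Spec_segment_display num (segment_display num)

-- ===== LEMMAS AND PROOFS =====

-- proof-side association of A's glyphs with their keys (not used by either port)
def sdTable : PySem.Dict Char (List (List Char)) :=
  PySem.Dict.ofList [('0', sdZero), ('1', sdOne), ('2', sdTwo), ('3', sdThree), ('4', sdFour), ('5', sdFive), ('6', sdSix), ('7', sdSeven), ('8', sdEight), ('9', sdNine), (' ', sdSpace)]

-- what one character contributes to A's row x
def sdSeg (x : Int) (y : Char) : List Char :=
  match sdTable.get? y with
  | some g => '|' :: PySem.List.pyGetD g x []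
  | none => []

-- the row piece B produces for mask m on row x
def sdRowPiece (x : Int) (m : Nat) : List Char :=
  if x = 0 then sdHPiece m 6
  else if x = 4 then sdHPiece m 3
  else if x = 8 then sdHPiece m 0
  else if x = 1 ∨ x = 2 ∨ x = 3 then sdVPiece m 5 4
  else sdVPiece m 2 1

theorem sdTable_items : sdTable.items =
    [('0', sdZero), ('1', sdOne), ('2', sdTwo), ('3', sdThree), ('4', sdFour), ('5', sdFive),
     ('6', sdSix), ('7', sdSeven), ('8', sdEight), ('9', sdNine), (' ', sdSpace)] := by
  decide

theorem sdStepA_eq (x : Int) (d : List Char) (y : Char) :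
    sdStepA x d y = d ++ sdSeg x y := by
  unfold sdStepA sdSeg
  by_cases h0 : y = '0'
  · subst h0; simp [show sdTable.get? '0' = some sdZero from by decide]
  by_cases h1 : y = '1'
  · subst h1; simp [h0, show sdTable.get? '1' = some sdOne from by decide]
  by_cases h2 : y = '2'
  · subst h2; simp [h0, h1, show sdTable.get? '2' = some sdTwo from by decide]
  by_cases h3 : y = '3'
  · subst h3; simp [h0, h1, h2, show sdTable.get? '3' = some sdThree from by decide]
  by_cases h4 : y = '4'
  · subst h4; simp [h0, h1, h2, h3, show sdTable.get? '4' = some sdFour from by decide]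
  by_cases h5 : y = '5'
  · subst h5; simp [h0, h1, h2, h3, h4, show sdTable.get? '5' = some sdFive from by decide]
  by_cases h6 : y = '6'
  · subst h6; simp [h0, h1, h2, h3, h4, h5, show sdTable.get? '6' = some sdSix from by decide]
  by_cases h7 : y = '7'
  · subst h7; simp [h0, h1, h2, h3, h4, h5, h6, show sdTable.get? '7' = some sdSeven from by decide]
  by_cases h8 : y = '8'
  · subst h8; simp [h0, h1, h2, h3, h4, h5, h6, h7, show sdTable.get? '8' = some sdEight from by decide]
  by_cases h9 : y = '9'
  · subst h9; simp [h0, h1, h2, h3, h4, h5, h6, h7, h8, show sdTable.get? '9' = some sdNine from by decide]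
  by_cases hs : y = ' '
  · subst hs; simp [h0, h1, h2, h3, h4, h5, h6, h7, h8, h9, show sdTable.get? ' ' = some sdSpace from by decide]
  have hnone : sdTable.get? y = none := by
    have b0 : ('0' == y) = false := by simp [Ne.symm h0]
    have b1 : ('1' == y) = false := by simp [Ne.symm h1]
    have b2 : ('2' == y) = false := by simp [Ne.symm h2]
    have b3 : ('3' == y) = false := by simp [Ne.symm h3]
    have b4 : ('4' == y) = false := by simp [Ne.symm h4]
    have b5 : ('5' == y) = false := by simp [Ne.symm h5]
    have b6 : ('6' == y) = false := by simp [Ne.symm h6]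
    have b7 : ('7' == y) = false := by simp [Ne.symm h7]
    have b8 : ('8' == y) = false := by simp [Ne.symm h8]
    have b9 : ('9' == y) = false := by simp [Ne.symm h9]
    have bs : (' ' == y) = false := by simp [Ne.symm hs]
    simp [PySem.Dict.get?, sdTable_items, List.find?, b0, b1, b2, b3, b4, b5, b6, b7, b8, b9, bs]
  simp [h0, h1, h2, h3, h4, h5, h6, h7, h8, h9, hs, hnone]

theorem sdRowA (x : Int) (cs : List Char) (d : List Char) :
    cs.foldl (sdStepA x) d = d ++ cs.flatMap (sdSeg x) := by
  have : sdStepA x = fun d y => d ++ sdSeg x y := by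
    funext d y; exact sdStepA_eq x d y
  rw [this, PySem.List.foldl_append_eq_flatMap]

-- the bitmask piece agrees with A's glyph row for every character, key or not
theorem sdSeg_eq (x : Int) (hx : x ∈ ([0,1,2,3,4,5,6,7,8] : List Int)) (c : Char) :
    sdSeg x c = (sdSEG.get? c).elim [] (fun m => '|' :: sdRowPiece x m) := by
  by_cases h0 : c = '0'
  · subst h0; fin_cases hx <;> decide
  by_cases h1 : c = '1'
  · subst h1; fin_cases hx <;> decide
  by_cases h2 : c = '2'
  · subst h2; fin_cases hx <;> decide
  by_cases h3 : c = '3'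
  · subst h3; fin_cases hx <;> decide
  by_cases h4 : c = '4'
  · subst h4; fin_cases hx <;> decide
  by_cases h5 : c = '5'
  · subst h5; fin_cases hx <;> decide
  by_cases h6 : c = '6'
  · subst h6; fin_cases hx <;> decide
  by_cases h7 : c = '7'
  · subst h7; fin_cases hx <;> decide
  by_cases h8 : c = '8'
  · subst h8; fin_cases hx <;> decide
  by_cases h9 : c = '9'
  · subst h9; fin_cases hx <;> decide
  by_cases hs : c = ' '
  · subst hs; fin_cases hx <;> decide
  have b0 : ('0' == c) = false := by simp [Ne.symm h0]
  have b1 : ('1' == c) = false := by simp [Ne.symm h1]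
  have b2 : ('2' == c) = false := by simp [Ne.symm h2]
  have b3 : ('3' == c) = false := by simp [Ne.symm h3]
  have b4 : ('4' == c) = false := by simp [Ne.symm h4]
  have b5 : ('5' == c) = false := by simp [Ne.symm h5]
  have b6 : ('6' == c) = false := by simp [Ne.symm h6]
  have b7 : ('7' == c) = false := by simp [Ne.symm h7]
  have b8 : ('8' == c) = false := by simp [Ne.symm h8]
  have b9 : ('9' == c) = false := by simp [Ne.symm h9]
  have bs : (' ' == c) = false := by simp [Ne.symm hs]
  have hta : sdTable.get? c = none := by
    simp [PySem.Dict.get?, sdTable_items, List.find?, b0, b1, b2, b3, b4, b5, b6, b7, b8, b9, bs]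
  have htb : sdSEG.get? c = none := by
    have hitems : sdSEG.items = [('0', 119), ('1', 18), ('2', 93), ('3', 91), ('4', 58),
        ('5', 107), ('6', 111), ('7', 82), ('8', 127), ('9', 123), (' ', 0)] := by decide
    simp [PySem.Dict.get?, hitems, List.find?, b0, b1, b2, b3, b4, b5, b6, b7, b8, b9, bs]
  simp [sdSeg, hta, htb]

theorem sd_flat (x : Int) (hx : x ∈ ([0,1,2,3,4,5,6,7,8] : List Int)) (cs : List Char) :
    cs.flatMap (sdSeg x) =
      (cs.filterMap (fun c => sdSEG.get? c)).flatMap (fun m => '|' :: sdRowPiece x m) := by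
  induction cs with
  | nil => rfl
  | cons c t ih =>
    simp only [List.flatMap_cons, List.filterMap_cons, ih]
    cases h : sdSEG.get? c with
    | none => simp [sdSeg_eq x hx c, h]
    | some m => simp [sdSeg_eq x hx c, h]

-- ===== VERDICT (by name: the statement is the Claim_ definition above) =====
theorem segment_display_spec : Claim_equal_segment_display := by
  intro num _
  unfold Spec_segment_display segment_display segment_display_alt
  dsimp only
  rw [show PySem.List.pyRange 0 9 1 = [0,1,2,3,4,5,6,7,8] from by decide]
  simp only [List.foldl_cons, List.foldl_nil, sdRowA,
    sd_flat 0 (by decide), sd_flat 1 (by decide), sd_flat 2 (by decide), sd_flat 3 (by decide),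
    sd_flat 4 (by decide), sd_flat 5 (by decide), sd_flat 6 (by decide), sd_flat 7 (by decide),
    sd_flat 8 (by decide)]
  simp [sdHRow, sdVRow, sdRowPiece, List.append_assoc]
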